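-- pv_equiv track=rewrite | github.com/w-meiners/anb-first-steps | src/utilities.py | ermittle_normdurchmesser
-- ===== SOURCE A (Python) =====
-- def ermittle_normdurchmesser(d):
--     """ Ermittle zum gegebenen Durchmesser d in mm
--         den zugehörigen Normdurchmesser in mm.
--
--         Der Normdurchmesser wird als der nächstgrößere
--         Durchmesser aus der Reihe der Normdurchmesser
--         ausgelesen.
--
--         Sind z.B. die Normdurchmesser
--         [65, 80, 90, 100]
--         gegeben, so liefert
--         >>> $:ermittle_normdurchmesser(87)
--         den Wert
--         90
--     """
--
--     # Liste der Normdurchmesser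
--     norm_durchmesser = [80,90,100,112,125,140,
--                         150,160,180,200,224,250,
--                         280,300,315,355,400,450,
--                         500,560,600,630,710,800,
--                         900,1000,1120,1250,1400,
--                         1600,1800,2000]
--
--     for d_n in norm_durchmesser:
--         if d_n >= d:
--             return d_n
--
--     raise Exception(f'Der Durchmesser {d} ist zu groß. Wählen Sie einen kleineren!')
-- ===== SOURCE B (Python) =====
-- def ermittle_normdurchmesser(d):
--     """ Ermittle zum gegebenen Durchmesser d in mm
--         den zugehörigen Normdurchmesser in mm (binäre Suche). """
--     norm_durchmesser = [80,90,100,112,125,140,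
--                         150,160,180,200,224,250,
--                         280,300,315,355,400,450,
--                         500,560,600,630,710,800,
--                         900,1000,1120,1250,1400,
--                         1600,1800,2000]
--     lo, hi = 0, len(norm_durchmesser)
--     while lo < hi:
--         mid = (lo + hi) // 2
--         if norm_durchmesser[mid] < d:
--             lo = mid + 1
--         else:
--             hi = mid
--     if lo == len(norm_durchmesser):
--         raise Exception(f'Der Durchmesser {d} ist zu groß. Wählen Sie einen kleineren!')
--     return norm_durchmesser[lo]
-- ===== Notes on version B (the rewrite author's own statement) =====
-- stated objective: alternative
-- what changed: Replaces the linear left-to-right scan over the fixed sorted list with a hand-written binary search (bisect_left style lo/hi loop) that locates the first element >= d, raising the identical Exception when the search runs past the end.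
import Mathlib
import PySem

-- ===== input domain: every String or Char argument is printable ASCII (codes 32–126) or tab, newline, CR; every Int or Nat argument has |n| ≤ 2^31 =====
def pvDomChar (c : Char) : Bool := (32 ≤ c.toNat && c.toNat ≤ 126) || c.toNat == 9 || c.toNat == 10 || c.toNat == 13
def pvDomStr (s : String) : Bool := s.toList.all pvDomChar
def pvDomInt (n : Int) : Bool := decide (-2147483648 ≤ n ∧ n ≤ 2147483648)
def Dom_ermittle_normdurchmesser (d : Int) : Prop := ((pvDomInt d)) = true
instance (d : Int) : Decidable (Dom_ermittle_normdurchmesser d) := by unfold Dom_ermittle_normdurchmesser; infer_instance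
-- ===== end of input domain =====

-- B replaces A's linear scan over the fixed sorted list by a hand-written binary search
-- (bisect_left-style lo/hi loop); return values only, the raise case is outside Pre_.

-- the fixed list of normed diameters (shared data of both Pythons)
def normDurchmesser : List Int :=
  [80,90,100,112,125,140,150,160,180,200,224,250,280,300,315,355,400,450,
   500,560,600,630,710,800,900,1000,1120,1250,1400,1600,1800,2000]

-- ===== PORT A =====
-- A's for-loop: return the first element ≥ d; the final `raise` is outside Pre_ (value 0 unreachable there)
def ermAux (d : Int) : List Int → Int
  | [] => 0
  | x :: xs => if x ≥ d then x else ermAux d xs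

def ermittle_normdurchmesser (d : Int) : Int := ermAux d normDurchmesser

-- ===== PORT B =====
-- B's while-loop as fuel recursion (fuel 6 ≥ log2 32 + 1 suffices for lo/hi within [0,32])
def blSearch (d : Int) : Nat → Nat → Nat → Nat
  | 0, lo, _ => lo
  | fuel + 1, lo, hi =>
      if lo < hi then
        let mid := (lo + hi) / 2
        if normDurchmesser.getD mid 0 < d then blSearch d fuel (mid + 1) hi
        else blSearch d fuel lo mid
      else lo

def ermittle_normdurchmesser_alt (d : Int) : Int :=
  let idx := blSearch d 6 0 normDurchmesser.length
  -- `idx = length` is the raise case, outside Pre_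
  normDurchmesser.getD idx 0

-- ===== PRECONDITION & SPEC =====
-- Pre_ excludes d > 2000, where the Python raises Exception
def Pre_ermittle_normdurchmesser (d : Int) : Prop := d ≤ 2000
instance (d : Int) : Decidable (Pre_ermittle_normdurchmesser d) := by unfold Pre_ermittle_normdurchmesser; infer_instance
def pvWitness_ermittle_normdurchmesser : Int := (87)

def Spec_ermittle_normdurchmesser (d : Int) (out : Int) : Prop := out = ermittle_normdurchmesser_alt d
instance (d : Int) (out : Int) : Decidable (Spec_ermittle_normdurchmesser d out) := by unfold Spec_ermittle_normdurchmesser; infer_instance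

-- ===== CLAIM (what is proved, stated in full; the proofs are below) =====
def Claim_equal_ermittle_normdurchmesser : Prop := ∀ (d : Int), Dom_ermittle_normdurchmesser d → Pre_ermittle_normdurchmesser d → Spec_ermittle_normdurchmesser d (ermittle_normdurchmesser d)

-- ===== LEMMAS AND PROOFS =====

-- A's scan returns l.getD r 0 when r is the first index whose element is ≥ d
theorem ermAux_eq (d : Int) : ∀ (l : List Int) (r : Nat), r < l.length →
    (∀ i, i < r → l.getD i 0 < d) → ¬ (l.getD r 0 < d) → ermAux d l = l.getD r 0 := by
  intro l
  induction l with
  | nil => intro r hr; simp at hr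
  | cons x xs ih =>
    intro r hr hlt hge
    cases r with
    | zero =>
      simp only [List.getD_cons_zero] at hge ⊢
      simp [ermAux, ge_iff_le]
      omega
    | succ r' =>
      have hx : x < d := by
        have := hlt 0 (Nat.succ_pos r')
        simpa using this
      simp only [List.getD_cons_succ]
      have : ermAux d (x :: xs) = ermAux d xs := by
        simp [ermAux]; omega
      rw [this]
      exact ih r' (by simpa using hr)
        (fun i hi => by simpa using hlt (i + 1) (by omega))
        (by simpa using hge)

-- the fixed list is sorted (checked by kernel computation)
theorem norm_sorted : ∀ i < 32, ∀ j < 32, i ≤ j →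
    normDurchmesser.getD i 0 ≤ normDurchmesser.getD j 0 := by decide

-- binary-search invariant: everything left of the result is < d, everything from it on is ≥ d
theorem bl_inv (d : Int) : ∀ (fuel lo hi : Nat), lo ≤ hi → hi ≤ 32 → hi - lo < 2 ^ fuel →
    (∀ i, i < lo → normDurchmesser.getD i 0 < d) →
    (∀ i, hi ≤ i → i < 32 → ¬ normDurchmesser.getD i 0 < d) →
    (∀ i, i < blSearch d fuel lo hi → normDurchmesser.getD i 0 < d) ∧
    (∀ i, blSearch d fuel lo hi ≤ i → i < 32 → ¬ normDurchmesser.getD i 0 < d) ∧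
    blSearch d fuel lo hi ≤ 32 := by
  intro fuel
  induction fuel with
  | zero =>
    intro lo hi h1 h2 h3 hP hQ
    have : lo = hi := by simp at h3; omega
    subst this
    exact ⟨hP, hQ, by simpa [blSearch] using h2⟩
  | succ f ih =>
    intro lo hi h1 h2 h3 hP hQ
    by_cases hlh : lo < hi
    · have hfuel : (2:Nat) ^ (f + 1) = 2 ^ f + 2 ^ f := by ring
      rw [hfuel] at h3
      have hmid1 : lo ≤ (lo + hi) / 2 := by omega
      have hmid2 : (lo + hi) / 2 < hi := by omega
      by_cases hc : normDurchmesser.getD ((lo + hi) / 2) 0 < d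
      · have hstep : blSearch d (f + 1) lo hi = blSearch d f ((lo + hi) / 2 + 1) hi := by
          simp [blSearch, hlh]
          intro h; exfalso; simp [List.getD] at hc; omega
        rw [hstep]
        refine ih ((lo + hi) / 2 + 1) hi (by omega) h2 (by omega) ?_ hQ
        intro i hi'
        by_cases hil : i < lo
        · exact hP i hil
        · have : normDurchmesser.getD i 0 ≤ normDurchmesser.getD ((lo + hi) / 2) 0 :=
            norm_sorted i (by omega) ((lo + hi) / 2) (by omega) (by omega)
          omega
      · have hstep : blSearch d (f + 1) lo hi = blSearch d f lo ((lo + hi) / 2) := by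
          simp [blSearch, hlh]
          intro h; exfalso; simp [List.getD] at hc; omega
        rw [hstep]
        refine ih lo ((lo + hi) / 2) (by omega) (by omega) (by omega) hP ?_
        intro i hi1 hi2
        by_cases hih : hi ≤ i
        · exact hQ i hih hi2
        · have : normDurchmesser.getD ((lo + hi) / 2) 0 ≤ normDurchmesser.getD i 0 :=
            norm_sorted ((lo + hi) / 2) (by omega) i (by omega) (by omega)
          omega
    · have : lo = hi := by omega
      subst this
      have : blSearch d (f + 1) lo lo = lo := by simp [blSearch]
      rw [this]
      exact ⟨hP, hQ, by omega⟩

-- ===== VERDICT (by name: the statement is the Claim_ definition above) =====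
theorem ermittle_normdurchmesser_spec : Claim_equal_ermittle_normdurchmesser := by
  intro d _ hpre
  unfold Pre_ermittle_normdurchmesser at hpre
  unfold Spec_ermittle_normdurchmesser ermittle_normdurchmesser ermittle_normdurchmesser_alt
  have hlen : normDurchmesser.length = 32 := by decide
  rw [hlen]
  obtain ⟨hPr, hQr, hr32⟩ := bl_inv d 6 0 32 (by omega) (by omega) (by norm_num)
    (by omega) (by omega)
  set r := blSearch d 6 0 32 with hrdef
  by_cases hr : r = 32
  · exfalso
    have h31 : normDurchmesser.getD 31 0 < d := hPr 31 (by omega)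
    have : normDurchmesser.getD 31 0 = 2000 := by decide
    omega
  · exact ermAux_eq d normDurchmesser r (by rw [hlen]; omega) hPr (hQr r (by omega) (by omega))
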